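-- pv_equiv track=rewrite | github.com/polotto/HackerRank | other-problems/priyanka-and-toys/__init__.py | toys
-- ===== SOURCE A (Python) =====
-- def toys(w):
--     w_s = sorted(w)
--     N = len(w_s)
--     containers = 1
--     base = w_s[0] + 4
--     while True:
--         # w_s = list(filter(lambda x: x > base, w_s))
--         w_s = [x for x in w_s if x > base]
--         if not w_s:
--             break
--         else:
--             containers += 1
--             base = w_s[0] + 4
--
--     return containers
-- ===== SOURCE B (Python) =====
-- def toys(w):
--     containers = 0
--     base = None
--     for x in sorted(w):
--         if base is None or x > base:
--             containers += 1
--             base = x + 4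
--     return containers
-- ===== Notes on version B (the rewrite author's own statement) =====
-- stated objective: faster
-- what changed: Replaces A's repeated whole-list filtering (rebuild the remaining list once per container) with a single greedy pass over the sorted list tracking the current window base.
import Mathlib
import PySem

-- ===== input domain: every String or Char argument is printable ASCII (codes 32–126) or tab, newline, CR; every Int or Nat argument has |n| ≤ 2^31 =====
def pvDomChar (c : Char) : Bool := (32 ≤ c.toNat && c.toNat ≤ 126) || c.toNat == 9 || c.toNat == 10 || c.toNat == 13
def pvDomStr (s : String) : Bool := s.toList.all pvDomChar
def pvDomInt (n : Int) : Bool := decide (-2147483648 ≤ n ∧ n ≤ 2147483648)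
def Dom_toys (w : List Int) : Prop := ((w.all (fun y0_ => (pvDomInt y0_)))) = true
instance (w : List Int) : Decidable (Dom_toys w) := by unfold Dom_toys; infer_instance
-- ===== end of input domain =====

-- B replaces A's repeated whole-list filtering (one rebuild per container) with a
-- single greedy pass over the sorted list tracking the current window base (faster).
-- ===== PORT A =====
-- A's while-loop: each iteration filters the remaining list by x > head+4;
-- recursion on the filtered list, which is strictly shorter (the head never survives).
def toysLoop : List Int → Int → Int
  | [], containers => containers
  | y :: t, containers =>
    let ws' := (y :: t).filter (fun x => decide (y + 4 < x))
    if h : ws' = [] then containers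
    else toysLoop ws' (containers + 1)
  termination_by ws _ => ws.length
  decreasing_by
    simp only [List.filter_cons, decide_eq_true_eq] at *
    have : ¬ (y + 4 < y) := by omega
    simp [this] at *
    exact List.length_filter_le _ _

def toys (w : List Int) : Int :=
  toysLoop (PySem.List.sorted w (fun x => x) false) 1

-- ===== PORT B =====
def toys_alt (w : List Int) : Int :=
  (List.foldl
    (fun (st : Int × Option Int) x =>
      match st.2 with
      | none => (st.1 + 1, some (x + 4))
      | some b => if b < x then (st.1 + 1, some (x + 4)) else st)
    (0, none) (PySem.List.sorted w (fun x => x) false)).1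

-- ===== PRECONDITION & SPEC =====
-- Pre_ excludes only the empty list, where A raises IndexError reading the first element.
def Pre_toys (w : List Int) : Prop := w ≠ []
instance (w : List Int) : Decidable (Pre_toys w) := by unfold Pre_toys; infer_instance
def pvWitness_toys : List Int := [3, 1, 9]

def Spec_toys (w : List Int) (out : Int) : Prop := out = toys_alt w
instance (w : List Int) (out : Int) : Decidable (Spec_toys w out) := by unfold Spec_toys; infer_instance

-- ===== CLAIM (what is proved, stated in full; the proofs are below) =====
def Claim_equal_toys : Prop := ∀ (w : List Int), Dom_toys w → Pre_toys w → Spec_toys w (toys w)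

-- ===== LEMMAS AND PROOFS =====

-- B's fold step, named for the lemmas.
def stepB (st : Int × Option Int) (x : Int) : Int × Option Int :=
  match st.2 with
  | none => (st.1 + 1, some (x + 4))
  | some b => if b < x then (st.1 + 1, some (x + 4)) else st

-- Skipping: with base b in hand, elements ≤ b' ≤ b are ignored by the fold.
theorem foldB_filter (t : List Int) (c b b' : Int) (hb : b' ≤ b) :
    List.foldl stepB (c, some b) t
      = List.foldl stepB (c, some b) (t.filter (fun x => decide (b' < x))) := by
  induction t generalizing c b with
  | nil => rfl
  | cons x t ih =>
    by_cases hx : b' < x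
    · rw [List.filter_cons, if_pos (by simpa using hx)]
      simp only [List.foldl_cons]
      by_cases hbx : b < x
      · simp only [stepB, if_pos hbx]
        exact ih (c + 1) (x + 4) (by omega)
      · simp only [stepB, if_neg hbx]
        exact ih c b hb
    · have hbx : ¬ b < x := by omega
      rw [List.filter_cons, if_neg (by simpa using hx)]
      simp only [List.foldl_cons, stepB, if_neg hbx]
      exact ih c b hb

-- Main correspondence: A's filter loop on y :: t equals B's fold with base y+4 over t.
theorem loop_eq_fold (n : ℕ) :
    ∀ (y : Int) (t : List Int) (c : Int), (y :: t).length ≤ n →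
      toysLoop (y :: t) c = (List.foldl stepB (c, some (y + 4)) t).1 := by
  induction n with
  | zero => intro y t c h; simp at h
  | succ n ih =>
    intro y t c h
    have hy : ¬ (y + 4 < y) := by omega
    have hf : (y :: t).filter (fun x => decide (y + 4 < x))
        = t.filter (fun x => decide (y + 4 < x)) := by
      simp [hy]
    rw [foldB_filter t c (y + 4) (y + 4) le_rfl]
    cases hft : t.filter (fun x => decide (y + 4 < x)) with
    | nil =>
      rw [toysLoop.eq_def]
      simp [hf, hft]
    | cons x r =>
      have hx : y + 4 < x := by
        have : x ∈ t.filter (fun x => decide (y + 4 < x)) := by rw [hft]; exact List.mem_cons_self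
        simpa using (List.of_mem_filter this)
      have hlen : (x :: r).length ≤ n := by
        have h1 : (x :: r).length ≤ t.length := by
          rw [← hft]; exact List.length_filter_le _ _
        simp at h
        omega
      rw [toysLoop.eq_def]
      simp only [hf, hft]
      rw [dif_neg (List.cons_ne_nil x r)]
      rw [ih x r (c + 1) hlen]
      simp [stepB, hx]

theorem toys_eq (w : List Int) (hw : w ≠ []) : toys w = toys_alt w := by
  unfold toys toys_alt
  cases hs : PySem.List.sorted w (fun x => x) false with
  | nil =>
    exfalso
    apply hw
    have := PySem.List.sorted_perm (xs := w) (key := fun x : Int => x) (rev := false)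
    rw [hs] at this
    exact (List.Perm.nil_eq this).symm
  | cons y t =>
    rw [loop_eq_fold ((y :: t).length) y t 1 le_rfl]
    simp only [List.foldl_cons]
    rfl

-- ===== VERDICT (by name: the statement is the Claim_ definition above) =====
theorem toys_spec : Claim_equal_toys := by
  intro w _ hpre
  unfold Spec_toys
  exact toys_eq w hpre
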